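-- pv_equiv track=rewrite | github.com/JoonHyeok-hozy-Kim/algorithm_study | BaekJoon/Solutions/Week3/Sol_E_220928_1285_failed.py | inspect_col
-- ===== SOURCE A (Python) =====
-- def inspect_col(coin_set):
--     N = len(coin_set)-1
--     checker = 1
--     for col_idx in range(N):
--         cnt = 0
--         for row_idx in range(N):
--             if coin_set[row_idx] & checker:
--                 cnt += 1
--         if cnt > N//2:
--             yield col_idx
--         checker *= 2
-- ===== SOURCE B (Python) =====
-- def inspect_col(coin_set):
--     # Tally table first: one pass over rows accumulating per-column bit counts,
--     # then a separate filtering pass over the table.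
--     N = len(coin_set) - 1
--     counts = [0] * N
--     for row_idx in range(N):
--         x = coin_set[row_idx]
--         counts = [c + (1 if x & (1 << i) else 0) for i, c in enumerate(counts)]
--     for i, c in enumerate(counts):
--         if c > N // 2:
--             yield i
-- ===== Notes on version B (the rewrite author's own statement) =====
-- stated objective: alternative
-- what changed: A rescans all rows for every column with a doubling checker mask; B makes one pass over the rows accumulating a per-column bit-tally table and then filters the table in a separate short pass.
import Mathlib
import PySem

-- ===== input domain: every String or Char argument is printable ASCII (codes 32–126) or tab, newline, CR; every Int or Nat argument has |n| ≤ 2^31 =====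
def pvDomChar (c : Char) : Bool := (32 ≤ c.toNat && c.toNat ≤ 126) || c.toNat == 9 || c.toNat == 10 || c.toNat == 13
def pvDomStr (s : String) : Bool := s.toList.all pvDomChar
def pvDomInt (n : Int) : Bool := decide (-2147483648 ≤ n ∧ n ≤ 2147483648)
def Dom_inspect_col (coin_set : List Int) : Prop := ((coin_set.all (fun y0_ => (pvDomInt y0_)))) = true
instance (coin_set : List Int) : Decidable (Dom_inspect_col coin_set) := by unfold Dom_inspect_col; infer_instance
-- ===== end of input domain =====

-- B replaces A's per-column rescans of all rows by one accumulated per-column tally table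
-- built in a single pass over the rows, followed by a separate filtering pass (objective: alternative decomposition).
-- Both A and B are Python generators; the ports return the list of yielded values.

-- ===== PORT A =====
-- Literal port of A: outer loop over col_idx with a doubling checker mask, inner loop counting
-- rows whose bit is set, yield col_idx when cnt > N//2.  coin_set[row_idx] is always in range
-- here (0 ≤ row_idx < N < len), so pyGetD's default is never used.
def inspect_col (coin_set : List Int) : List Int :=
  let N : Int := (coin_set.length : Int) - 1
  (((PySem.List.pyRange 0 N 1).foldl (fun (st : Int × List Int) col_idx =>
      let cnt : Int := (PySem.List.pyRange 0 N 1).foldl (fun cnt row_idx =>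
          if PySem.Int.band (PySem.List.pyGetD coin_set row_idx 0) st.1 ≠ 0 then cnt + 1 else cnt) 0
      (st.1 * 2, if cnt > PySem.Int.floordiv N 2 then st.2 ++ [col_idx] else st.2))
    ((1 : Int), ([] : List Int))).2)

-- ===== PORT B =====
-- Literal port of B: counts = [0]*N; one pass over rows rebuilding counts with
-- [c + (1 if x & (1 << i) else 0) for i, c in enumerate(counts)]; then yield i where counts[i] > N//2.
-- ic.1.toNat is exact: enumerate indices are ≥ 0.
def inspect_col_alt (coin_set : List Int) : List Int :=
  let N : Int := (coin_set.length : Int) - 1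
  let counts0 : List Int := PySem.List.pyRepeat [0] N
  let counts := (PySem.List.pyRange 0 N 1).foldl (fun counts row_idx =>
      let x := PySem.List.pyGetD coin_set row_idx 0
      (PySem.List.enumerate counts).map (fun ic =>
        ic.2 + (if PySem.Int.band x ((1 : Int) <<< ic.1.toNat) ≠ 0 then (1 : Int) else 0))) counts0
  (PySem.List.enumerate counts).filterMap (fun ic =>
    if ic.2 > PySem.Int.floordiv N 2 then some ic.1 else none)

-- ===== PRECONDITION & SPEC =====
def Spec_inspect_col (coin_set : List Int) (out : List Int) : Prop := out = inspect_col_alt coin_set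
instance (coin_set : List Int) (out : List Int) : Decidable (Spec_inspect_col coin_set out) := by unfold Spec_inspect_col; infer_instance

-- ===== CLAIM (what is proved, stated in full; the proofs are below) =====
def Claim_equal_inspect_col : Prop := ∀ (coin_set : List Int), Dom_inspect_col coin_set → Spec_inspect_col coin_set (inspect_col coin_set)

-- ===== LEMMAS AND PROOFS =====

-- bit c of x (as 0/1), partial count of set bits in column c over the first m rows, and the
-- common reference result both ports are reduced to.
def pvBit (x : Int) (c : Nat) : Int := if PySem.Int.band x (2 ^ c) ≠ 0 then 1 else 0

def pvCnt (cs : List Int) (m c : Nat) : Int :=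
  ((List.range m).map (fun r => pvBit (cs.getD r 0) c)).sum

def pvRef (cs : List Int) (n : Nat) (thr : Int) : List Int :=
  (List.range n).filterMap (fun c => if pvCnt cs n c > thr then some ((c : Nat) : Int) else none)

lemma pvRange0 (N : Int) :
    PySem.List.pyRange 0 N 1 = (List.range N.toNat).map (fun k => ((k : Nat) : Int)) := by
  simp [PySem.List.pyRange_one]

-- A's inner row loop equals c0 + (sum of bits of column given by mask).
lemma A_inner (cs : List Int) (msk : Int) : ∀ (m : Nat) (c0 : Int),
    ((List.range m).map (fun k => ((k : Nat) : Int))).foldl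
      (fun cnt r => if PySem.Int.band (PySem.List.pyGetD cs r 0) msk ≠ 0 then cnt + 1 else cnt) c0
    = c0 + ((List.range m).map (fun r => if PySem.Int.band (cs.getD r 0) msk ≠ 0 then (1 : Int) else 0)).sum := by
  intro m
  induction m with
  | zero => simp
  | succ m ih =>
      intro c0
      simp only [List.range_succ, List.map_append, List.foldl_append, List.sum_append,
        List.map_cons, List.map_nil, List.foldl_cons, List.foldl_nil, List.sum_cons, List.sum_nil,
        PySem.List.pyGetD_natCast]
      rw [ih]
      split_ifs <;> ring

-- A's inner loop with checker 2^a, started at 0, is the column-a bit count.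
lemma A_inner_cnt (cs : List Int) (n a : Nat) :
    ((List.range n).map (fun k => ((k : Nat) : Int))).foldl
      (fun cnt r => if PySem.Int.band (PySem.List.pyGetD cs r 0) ((2:Int)^a) ≠ 0 then cnt + 1 else cnt) 0
    = pvCnt cs n a := by
  rw [A_inner]
  simp [pvCnt, pvBit]

-- A's outer loop with checker 2^a over columns a, a+1, …, a+m-1.
lemma A_outer (cs : List Int) (n : Nat) (thr : Int) : ∀ (m a : Nat) (acc : List Int),
    (((List.range m).map (fun k => ((a + k : Nat) : Int))).foldl
      (fun (st : Int × List Int) col_idx =>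
        (st.1 * 2,
         if ((List.range n).map (fun k => ((k : Nat) : Int))).foldl
              (fun cnt row_idx =>
                if PySem.Int.band (PySem.List.pyGetD cs row_idx 0) st.1 ≠ 0 then cnt + 1 else cnt) 0
            > thr
         then st.2 ++ [col_idx] else st.2))
      ((2 : Int) ^ a, acc)).2
    = acc ++ (List.range m).filterMap
        (fun k => if pvCnt cs n (a + k) > thr then some ((a + k : Nat) : Int) else none) := by
  intro m
  induction m with
  | zero => simp
  | succ m ih =>
      intro a acc
      rw [List.range_succ_eq_map]
      simp only [List.map_cons, List.foldl_cons, List.filterMap_cons, List.map_map,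
        List.filterMap_map, Nat.add_zero]
      have hmap : ((fun k => ((a + k : Nat) : Int)) ∘ Nat.succ) = fun k => (((a + 1) + k : Nat) : Int) := by
        funext k; exact congrArg (fun m : Nat => (m : Int)) (by omega)
      have hmap2 : ((fun k => if pvCnt cs n (a + k) > thr then some ((a + k : Nat) : Int) else none) ∘ Nat.succ)
          = fun k => if pvCnt cs n ((a + 1) + k) > thr then some (((a + 1) + k : Nat) : Int) else none := by
        funext k
        simp only [Function.comp_apply]
        rw [show a + Nat.succ k = (a + 1) + k from by omega]
      rw [hmap, hmap2, A_inner_cnt cs n a,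
        show (2:Int)^a * 2 = 2^(a+1) from by ring,
        ih (a + 1) (if pvCnt cs n a > thr then acc ++ [((a : Nat) : Int)] else acc)]
      by_cases h : pvCnt cs n a > thr <;> simp [h, List.append_assoc]

-- B: enumerate of a range-map is a range-map of pairs.
lemma enum_range (f : Nat → Int) : ∀ (n a : Nat),
    PySem.List.enumerate ((List.range n).map (fun c => f (a + c))) ((a : Nat) : Int)
    = (List.range n).map (fun c => (((a + c : Nat) : Int), f (a + c))) := by
  intro n
  induction n with
  | zero => simp
  | succ n ih =>
      intro a
      rw [List.range_succ_eq_map]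
      simp only [List.map_cons, List.map_map, PySem.List.enumerate_cons, Nat.add_zero]
      have hmap : ((fun c => f (a + c)) ∘ Nat.succ) = fun c => f ((a + 1) + c) := by
        funext c; exact congrArg f (by omega)
      have hmap2 : ((fun c => (((a + c : Nat) : Int), f (a + c))) ∘ Nat.succ)
          = fun c => ((((a+1) + c : Nat) : Int), f ((a+1) + c)) := by
        funext c
        refine Prod.ext ?_ (congrArg f (by omega))
        simp; omega
      rw [hmap, hmap2]
      have : ((a : Nat) : Int) + 1 = (((a + 1 : Nat)) : Int) := by push_cast; ring
      rw [this, ih (a + 1)]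

-- Python's 1 << c on a nonnegative Int c (Mathlib's Int-by-Int shift) is 2^c
lemma pvShift_one (c : Nat) : (1 : Int) <<< ((c : Nat) : Int) = 2 ^ c := by
  have h := Int.shiftLeft_natCast 1 c
  simpa [Nat.shiftLeft_eq] using h

lemma enum_range0 (f : Nat → Int) (n : Nat) :
    PySem.List.enumerate ((List.range n).map f) 0
    = (List.range n).map (fun c => (((c : Nat) : Int), f c)) := by
  have h := enum_range f n 0
  simpa using h

-- one row of B's comprehension adds the row's bit to every column tally
lemma B_step (x : Int) (n : Nat) (f : Nat → Int) :
    (PySem.List.enumerate ((List.range n).map f)).map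
      (fun ic => ic.2 + (if PySem.Int.band x ((1 : Int) <<< ic.1.toNat) ≠ 0 then (1 : Int) else 0))
    = (List.range n).map (fun c => f c + pvBit x c) := by
  rw [enum_range0, List.map_map]
  congr 1
  funext c
  simp only [Function.comp_apply, Int.toNat_natCast, pvShift_one, pvBit]
  split_ifs <;> rfl

-- after folding the first m rows, the tally table holds the partial column counts
lemma B_rows (cs : List Int) (n : Nat) : ∀ (m : Nat),
    ((List.range m).map (fun k => ((k : Nat) : Int))).foldl
      (fun counts row_idx =>
        (PySem.List.enumerate counts).map (fun ic =>
          ic.2 + (if PySem.Int.band (PySem.List.pyGetD cs row_idx 0) ((1 : Int) <<< ic.1.toNat) ≠ 0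
                  then (1 : Int) else 0)))
      ((List.range n).map (fun _ => (0 : Int)))
    = (List.range n).map (fun c => pvCnt cs m c) := by
  intro m
  induction m with
  | zero => simp [pvCnt]
  | succ m ih =>
      simp only [List.range_succ, List.map_append, List.foldl_append, List.map_cons, List.map_nil,
        List.foldl_cons, List.foldl_nil]
      rw [ih, PySem.List.pyGetD_natCast, B_step]
      congr 1
      funext c
      simp [pvCnt, List.range_succ]

lemma B_final (n : Nat) (g : Nat → Int) (thr : Int) :
    (PySem.List.enumerate ((List.range n).map g)).filterMap
      (fun ic => if ic.2 > thr then some ic.1 else none)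
    = (List.range n).filterMap (fun c => if g c > thr then some ((c : Nat) : Int) else none) := by
  rw [enum_range0, List.filterMap_map]
  rfl

lemma main_eq (cs : List Int) : inspect_col cs = inspect_col_alt cs := by
  simp only [inspect_col, inspect_col_alt, pvRange0, PySem.List.pyRepeat_singleton]
  rw [show List.replicate ((cs.length : Int) - 1).toNat (0 : Int)
        = (List.range ((cs.length : Int) - 1).toNat).map (fun _ => (0 : Int)) from by
      simp [List.map_const']]
  rw [B_rows cs _ _, B_final]
  have hA := A_outer cs ((cs.length : Int) - 1).toNat (PySem.Int.floordiv ((cs.length : Int) - 1) 2)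
    ((cs.length : Int) - 1).toNat 0 []
  simpa using hA

-- ===== VERDICT (by name: the statement is the Claim_ definition above) =====
theorem inspect_col_spec : Claim_equal_inspect_col := by
  intro cs _
  unfold Spec_inspect_col
  exact main_eq cs
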